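-- pv_equiv track=rewrite | github.com/Harshil089/DawgCTF | Cryptography/Cantor's Pairadox/counter's paradox.py | reverse_pair_array
-- ===== SOURCE A (Python) =====
-- from math import isqrt
--
-- def getTriNumber(n):
--     return n * (n + 1) // 2
--
-- def unpair(p):
--     S = (isqrt(8 * p + 1) - 1) // 2
--     T_S = getTriNumber(S)
--     n2 = p - T_S
--     n1 = S - n2
--     return (n1, n2)
--
-- def reverse_pair_array(encoded, steps=6):
--     current = [encoded]
--     for _ in range(steps):
--         new_current = []
--         for num in current:
--             n1, n2 = unpair(num)
--             new_current.extend([n1, n2])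
--         current = new_current
--     return current
-- ===== SOURCE B (Python) =====
-- from math import isqrt
--
-- def getTriNumber(n):
--     return n * (n + 1) // 2
--
-- def unpair(p):
--     S = (isqrt(8 * p + 1) - 1) // 2
--     T_S = getTriNumber(S)
--     n2 = p - T_S
--     n1 = S - n2
--     return (n1, n2)
--
-- def reverse_pair_array(encoded, steps=6):
--     if steps <= 0:
--         return [encoded]
--     n1, n2 = unpair(encoded)
--     return reverse_pair_array(n1, steps - 1) + reverse_pair_array(n2, steps - 1)
-- ===== Notes on version B (the rewrite author's own statement) =====
-- stated objective: alternative
-- what changed: Replaced the level-by-level BFS loop that rebuilds the whole list each round with a divide-and-conquer recursion: unpair once and concatenate the recursive expansions of the two children for steps-1 levels.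
import Mathlib
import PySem

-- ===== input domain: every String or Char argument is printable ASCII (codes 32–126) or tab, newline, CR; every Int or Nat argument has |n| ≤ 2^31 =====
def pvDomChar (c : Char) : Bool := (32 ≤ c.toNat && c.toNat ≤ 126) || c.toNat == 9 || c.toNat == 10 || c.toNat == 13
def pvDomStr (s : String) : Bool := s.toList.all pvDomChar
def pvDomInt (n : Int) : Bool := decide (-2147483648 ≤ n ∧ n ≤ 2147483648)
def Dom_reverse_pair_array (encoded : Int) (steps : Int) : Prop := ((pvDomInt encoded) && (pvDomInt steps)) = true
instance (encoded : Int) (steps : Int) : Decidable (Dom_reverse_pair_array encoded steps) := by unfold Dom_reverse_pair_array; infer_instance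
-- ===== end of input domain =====

-- B replaces A's level-by-level loop with a divide-and-conquer recursion on the two
-- children; same cost, different decomposition (objective: alternative).

-- shared module helpers (both Pythons use the same getTriNumber/unpair)
def getTriNumber (n : Int) : Int := PySem.Int.floordiv (n * (n + 1)) 2

-- math.isqrt p for p ≥ 0 is Nat.sqrt; Python raises ValueError for p < 0, excluded by Pre_
def pyIsqrt (p : Int) : Int := (Nat.sqrt p.toNat : Int)

def unpair (p : Int) : Int × Int :=
  let S := PySem.Int.floordiv (pyIsqrt (8 * p + 1) - 1) 2
  let T_S := getTriNumber S
  let n2 := p - T_S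
  let n1 := S - n2
  (n1, n2)

-- ===== PORT A =====
def reverse_pair_array (encoded : Int) (steps : Int) : List Int :=
  (List.range steps.toNat).foldl
    (fun current _ =>
      current.foldl (fun new_current num =>
        new_current ++ [(unpair num).1, (unpair num).2]) [])
    [encoded]

-- ===== PORT B =====
-- fuel form of Source B's recursion on steps (steps ≤ 0 ↔ fuel 0)
def revAlt (encoded : Int) : Nat → List Int
  | 0 => [encoded]
  | n + 1 =>
    let p := unpair encoded
    revAlt p.1 n ++ revAlt p.2 n

def reverse_pair_array_alt (encoded : Int) (steps : Int) : List Int :=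
  if steps ≤ 0 then [encoded] else revAlt encoded steps.toNat

-- ===== PRECONDITION & SPEC =====
-- Pre_ excludes exactly the inputs where Python A raises ValueError (isqrt of a
-- negative argument): a negative encoded with at least one unpairing step.
def Pre_reverse_pair_array (encoded : Int) (steps : Int) : Prop := 0 ≤ encoded ∨ steps ≤ 0
instance (encoded : Int) (steps : Int) : Decidable (Pre_reverse_pair_array encoded steps) := by unfold Pre_reverse_pair_array; infer_instance
def pvWitness_reverse_pair_array : Int × Int := (100, 3)

def Spec_reverse_pair_array (encoded : Int) (steps : Int) (out : List Int) : Prop := out = reverse_pair_array_alt encoded steps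
instance (encoded : Int) (steps : Int) (out : List Int) : Decidable (Spec_reverse_pair_array encoded steps out) := by unfold Spec_reverse_pair_array; infer_instance

-- ===== CLAIM (what is proved, stated in full; the proofs are below) =====
def Claim_equal_reverse_pair_array : Prop := ∀ (encoded : Int) (steps : Int), Dom_reverse_pair_array encoded steps → Pre_reverse_pair_array encoded steps → Spec_reverse_pair_array encoded steps (reverse_pair_array encoded steps)

-- ===== LEMMAS AND PROOFS =====

-- A's inner pass over one level is a flatMap into the two children
theorem level_step (cur : List Int) :
    cur.foldl (fun new_current num =>
        new_current ++ [(unpair num).1, (unpair num).2]) []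
      = cur.flatMap (fun num => [(unpair num).1, (unpair num).2]) := by
  simpa using PySem.List.foldl_append_eq_flatMap (l := cur) (acc := [])
    (g := fun num => [(unpair num).1, (unpair num).2])

-- n rounds of expansion-by-flatMap of any level give the flatMap of B's DFS leaves
theorem foldl_flat (n : Nat) (cur : List Int) :
    (List.range n).foldl
      (fun current _ => current.flatMap (fun num => [(unpair num).1, (unpair num).2])) cur
      = cur.flatMap (fun x => revAlt x n) := by
  induction n generalizing cur with
  | zero => simp [revAlt]
  | succ n ih =>
    rw [List.range_succ_eq_map, List.foldl_cons, List.foldl_map]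
    rw [ih, List.flatMap_assoc]
    congr 1
    funext x
    simp [revAlt]

-- A's loop equals the flatMap of B's DFS leaves
theorem levels_eq_dfs (n : Nat) (cur : List Int) :
    (List.range n).foldl
      (fun current _ =>
        current.foldl (fun new_current num =>
          new_current ++ [(unpair num).1, (unpair num).2]) []) cur
      = cur.flatMap (fun x => revAlt x n) := by
  have hf : (fun (current : List Int) (_ : Nat) =>
      current.foldl (fun new_current num =>
        new_current ++ [(unpair num).1, (unpair num).2]) [])
      = (fun (current : List Int) (_ : Nat) =>
          current.flatMap (fun num => [(unpair num).1, (unpair num).2])) :=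
    funext fun c => funext fun _ => level_step c
  rw [hf, foldl_flat]

-- ===== VERDICT (by name: the statement is the Claim_ definition above) =====
theorem reverse_pair_array_spec : Claim_equal_reverse_pair_array := by
  intro encoded steps _ _
  unfold Spec_reverse_pair_array reverse_pair_array reverse_pair_array_alt
  rw [levels_eq_dfs]
  by_cases h : steps ≤ 0
  · have : steps.toNat = 0 := Int.toNat_of_nonpos h
    simp [h, this, revAlt]
  · simp [h]
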